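-- pv_equiv track=rewrite | github.com/nimajoudi/Cando | Practice3.py | create_multiplication_table
-- ===== SOURCE A (Python) =====
-- def create_multiplication_table(num1, num2):
--     table = []
--     results = []
--     for i in range(1, num1 + 1):
--         row = []
--         for j in range(1, num2 + 1):
--             if i == 2 or j == 2:
--                 row.append(None)  # نادیده گرفتن عدد 2 در سطر و ستون
--             else:
--                 product = i * j
--                 row.append(product)
--                 results.append(product)
--         table.append(row)
--     return table, results
-- ===== SOURCE B (Python) =====
-- def create_multiplication_table(num1, num2):
--     js = range(1, num2 + 1)
--     table = []
--     for i in range(1, num1 + 1):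
--         if i == 2:
--             table.append([None] * num2)
--         else:
--             row = [i * j for j in js]       # full products first ...
--             if num2 >= 2:
--                 row[1] = None               # ... then blank out column 2
--             table.append(row)
--     # results computed independently of the table from the filtered index lists
--     results = [i * j for i in range(1, num1 + 1) if i != 2 for j in js if j != 2]
--     return table, results
-- ===== Notes on version B (the rewrite author's own statement) =====
-- stated objective: alternative
-- what changed: Instead of one interleaved loop filling table and results together with a per-element three-way test, B builds each table row as plain products and then patches index 1 to None (row 2 comes from a replicated all-None row), and computes results in a separate pass directly from the filtered index lists, never via the table.
import Mathlib
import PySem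

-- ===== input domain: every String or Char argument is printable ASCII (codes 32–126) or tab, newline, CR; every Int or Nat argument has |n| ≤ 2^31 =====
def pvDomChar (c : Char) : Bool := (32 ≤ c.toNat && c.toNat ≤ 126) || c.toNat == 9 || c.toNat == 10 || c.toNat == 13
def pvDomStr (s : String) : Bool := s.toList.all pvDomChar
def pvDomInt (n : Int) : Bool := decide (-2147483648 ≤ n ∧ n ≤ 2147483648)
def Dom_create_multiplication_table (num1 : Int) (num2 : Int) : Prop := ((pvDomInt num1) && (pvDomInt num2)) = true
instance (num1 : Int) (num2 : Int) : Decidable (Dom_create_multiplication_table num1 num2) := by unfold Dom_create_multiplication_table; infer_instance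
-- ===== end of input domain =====

-- B builds each table row as plain products and patches column 2 to None afterwards
-- (row 2 is a replicated all-None row), and computes results in a separate pass from the
-- filtered index lists, independently of the table (objective: alternative).

-- ===== PORT A =====
-- A: one interleaved loop; state (table, results); for each i the inner loop carries (row, results).
-- Python's O(1) list.append is encoded as cons onto a reversed accumulator, reversed back when
-- the corresponding loop finishes (exact: same elements appended in the same order).
def create_multiplication_table (num1 : Int) (num2 : Int) : List (List (Option Int)) × List Int :=
  let st :=
    (PySem.List.pyRange 1 (num1 + 1) 1).foldl
      (fun (st : List (List (Option Int)) × List Int) i =>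
        let inner :=
          (PySem.List.pyRange 1 (num2 + 1) 1).foldl
            (fun (rr : List (Option Int) × List Int) j =>
              if i == 2 || j == 2 then (none :: rr.1, rr.2)
              else (some (i * j) :: rr.1, i * j :: rr.2))
            ([], st.2)
        (inner.1.reverse :: st.1, inner.2))
      ([], [])
  (st.1.reverse, st.2.reverse)

-- ===== PORT B =====
-- `row[1] = None` is ported as List.set 1 (exact: Python's index-1 assignment, guarded by num2 >= 2
-- which makes the index in range); `none_row[:]` (a copy) is the row itself in Lean; table.append
-- is the same cons-onto-reversed-accumulator encoding as in port A.
def create_multiplication_table_alt (num1 : Int) (num2 : Int) : List (List (Option Int)) × List Int :=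
  -- B's `js = range(1, num2+1)` is a lazy range object; its list of values
  -- `PySem.List.pyRange 1 (num2+1) 1` appears inline exactly where B iterates it.
  let table :=
    ((PySem.List.pyRange 1 (num1 + 1) 1).foldl
      (fun (t : List (List (Option Int))) i =>
        if i == 2 then PySem.List.pyRepeat [(none : Option Int)] num2 :: t   -- [None] * num2
        else
          let row := (PySem.List.pyRange 1 (num2 + 1) 1).map (fun j => some (i * j))
          let row := if 2 ≤ num2 then row.set 1 none else row
          row :: t)
      []).reverse
  let results :=
    ((PySem.List.pyRange 1 (num1 + 1) 1).filter (fun i => i != 2)).flatMap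
      (fun i => ((PySem.List.pyRange 1 (num2 + 1) 1).filter (fun j => j != 2)).map (fun j => i * j))
  (table, results)

-- ===== PRECONDITION & SPEC =====
def Spec_create_multiplication_table (num1 : Int) (num2 : Int) (out : List (List (Option Int)) × List Int) : Prop := out = create_multiplication_table_alt num1 num2
instance (num1 : Int) (num2 : Int) (out : List (List (Option Int)) × List Int) : Decidable (Spec_create_multiplication_table num1 num2 out) := by unfold Spec_create_multiplication_table; infer_instance

-- ===== CLAIM (what is proved, stated in full; the proofs are below) =====
def Claim_equal_create_multiplication_table : Prop := ∀ (num1 : Int) (num2 : Int), Dom_create_multiplication_table num1 num2 → Spec_create_multiplication_table num1 num2 (create_multiplication_table num1 num2)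

-- ===== LEMMAS AND PROOFS =====

-- the row A produces for a given i
def pvRowA (i : Int) (num2 : Int) : List (Option Int) :=
  (PySem.List.pyRange 1 (num2 + 1) 1).map (fun j =>
    if i == 2 || j == 2 then (none : Option Int) else some (i * j))

-- the non-None products A appends to results for a given i
def pvResA (i : Int) (num2 : Int) : List Int :=
  if i == 2 then []
  else ((PySem.List.pyRange 1 (num2 + 1) 1).filter (fun j => j != 2)).map (fun j => i * j)

-- inner loop of A, over an arbitrary list of j's, starting from (r, res) (both reversed accumulators)
theorem pv_inner (i : Int) (js : List Int) (r : List (Option Int)) (res : List Int) :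
    js.foldl
      (fun (rr : List (Option Int) × List Int) j =>
        if i == 2 || j == 2 then (none :: rr.1, rr.2)
        else (some (i * j) :: rr.1, i * j :: rr.2))
      (r, res)
    = ((js.map (fun j => if i == 2 || j == 2 then (none : Option Int) else some (i * j))).reverse ++ r,
       (if i == 2 then [] else (js.filter (fun j => j != 2)).map (fun j => i * j)).reverse ++ res) := by
  induction js generalizing r res with
  | nil => simp
  | cons j js ih =>
    rw [List.foldl_cons]
    by_cases h : (i == 2 || j == 2) = true
    · rw [if_pos h, ih]
      simp only [Bool.or_eq_true, beq_iff_eq] at h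
      rcases h with h | h <;> simp [h]
    · rw [if_neg h, ih]
      simp only [Bool.or_eq_true, beq_iff_eq, not_or] at h
      simp [h.1, h.2]

-- outer loop of A, over an arbitrary list of i's (both components reversed accumulators)
theorem pv_outer (num2 : Int) (is : List Int) (t : List (List (Option Int))) (res : List Int) :
    is.foldl
      (fun (st : List (List (Option Int)) × List Int) i =>
        let inner :=
          (PySem.List.pyRange 1 (num2 + 1) 1).foldl
            (fun (rr : List (Option Int) × List Int) j =>
              if i == 2 || j == 2 then (none :: rr.1, rr.2)
              else (some (i * j) :: rr.1, i * j :: rr.2))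
            ([], st.2)
        (inner.1.reverse :: st.1, inner.2))
      (t, res)
    = ((is.map (fun i => pvRowA i num2)).reverse ++ t,
       (is.flatMap (fun i => pvResA i num2)).reverse ++ res) := by
  induction is generalizing t res with
  | nil => simp
  | cons i is ih =>
    simp only [List.foldl_cons]
    rw [pv_inner, ih]
    simp [pvRowA, pvResA, List.append_assoc]

-- the row B produces for a given i
def pvRowB (i : Int) (num2 : Int) : List (Option Int) :=
  if i == 2 then PySem.List.pyRepeat [(none : Option Int)] num2
  else
    let row := (PySem.List.pyRange 1 (num2 + 1) 1).map (fun j => some (i * j))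
    if 2 ≤ num2 then row.set 1 none else row

-- B's table foldl accumulates exactly the reversed map of pvRowB
theorem pv_tableB (num2 : Int) (is : List Int) (t : List (List (Option Int))) :
    is.foldl
      (fun (t : List (List (Option Int))) i =>
        if i == 2 then PySem.List.pyRepeat [(none : Option Int)] num2 :: t
        else
          let row := (PySem.List.pyRange 1 (num2 + 1) 1).map (fun j => some (i * j))
          let row := if 2 ≤ num2 then row.set 1 none else row
          row :: t)
      t
    = (is.map (fun i => pvRowB i num2)).reverse ++ t := by
  induction is generalizing t with
  | nil => simp
  | cons i is ih =>
    rw [List.foldl_cons]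
    by_cases h : (i == 2) = true
    · rw [if_pos h, ih]
      simp only [beq_iff_eq] at h
      simp [pvRowB, h]
    · rw [if_neg h, ih]
      simp only [beq_iff_eq] at h
      simp [pvRowB, h]

-- A's row equals B's row for every i
theorem pv_row_eq (i num2 : Int) : pvRowA i num2 = pvRowB i num2 := by
  by_cases h : i = 2
  · simp only [pvRowA, pvRowB, h]
    simp only [show ((2:Int) == 2) = true from rfl, Bool.true_or, if_true]
    rw [PySem.List.pyRepeat_singleton, List.eq_replicate_iff]
    refine ⟨by simp [PySem.List.length_pyRange_one], ?_⟩
    intro b hb; simp at hb; exact hb.2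
  · have hb : (i == 2) = false := by simp [h]
    simp only [pvRowA, pvRowB, hb, Bool.false_or, Bool.false_eq_true, if_false]
    by_cases h2 : 2 ≤ num2
    · rw [if_pos h2, PySem.List.pyRange_one]
      apply List.ext_getElem
      · simp
      · intro k hk hk'
        simp only [List.getElem_map] at hk ⊢
        rw [List.getElem_set]
        simp only [List.getElem_map, List.getElem_range]
        simp only [List.length_map, List.length_range] at hk
        by_cases hk1 : 1 = k
        · subst hk1; norm_num
        · rw [if_neg hk1]
          have : ¬ ((1 : Int) + k = 2) := by omega
          simp [this]
    · rw [if_neg h2, PySem.List.pyRange_one]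
      apply List.map_congr_left
      intro j hj
      simp only [List.mem_map, List.mem_range] at hj
      obtain ⟨k, hk, rfl⟩ := hj
      have hn : ((num2 + 1 - 1).toNat : Int) ≤ num2 := by omega
      have : ¬ ((1 : Int) + k = 2) := by omega
      simp [this]

-- A's results part equals B's flatMap over filtered rows
theorem pv_res_eq (num1 num2 : Int) :
    (PySem.List.pyRange 1 (num1 + 1) 1).flatMap (fun i => pvResA i num2)
    = ((PySem.List.pyRange 1 (num1 + 1) 1).filter (fun i => i != 2)).flatMap
        (fun i => ((PySem.List.pyRange 1 (num2 + 1) 1).filter (fun j => j != 2)).map (fun j => i * j)) := by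
  generalize PySem.List.pyRange 1 (num1 + 1) 1 = is
  induction is with
  | nil => simp
  | cons i is ih =>
    rw [List.flatMap_cons, ih]
    by_cases h : i = 2
    · simp [pvResA, h]
    · simp [pvResA, h]

-- ===== VERDICT (by name: the statement is the Claim_ definition above) =====
theorem create_multiplication_table_spec : Claim_equal_create_multiplication_table := by
  intro num1 num2 _
  unfold Spec_create_multiplication_table create_multiplication_table create_multiplication_table_alt
  rw [pv_outer]
  simp only [pv_tableB, List.append_nil, List.reverse_reverse]
  refine Prod.ext ?_ ?_
  · exact List.map_congr_left (fun i _ => pv_row_eq i num2)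
  · exact pv_res_eq num1 num2
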